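-- pv_equiv track=rewrite | github.com/AdrianSofariu/University | First Year/Fundamentals of Programming/a5-AdrianSofariu/src/program.py | real_mountain_subarray
-- ===== SOURCE A (Python) =====
-- def get_real_part(number: list) -> int:
--     """
--     Returns real part of a complex number stored as a list
--     :param number: complex number as list
--     :return: real part
--     """
--     return number[0]
--
-- def real_mountain_subarray(complex_numbers: list) -> list:
--     """
--     Length and elements for the longest subarray of numbers where
--     their real part is in the form of a mountain (first the values increase, then they decrease).
--     :param complex_numbers: list of complex numbers
--     :return:
--     """
--     subarray = []
--     maxlength = 0
--     starting_from = 0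
--     max_starting_from = 0
--     length = 0
--     n = len(complex_numbers)
--
--     for i in range(n):
--         # if number is a mountain update the subarray data
--         if mountain(get_real_part(complex_numbers[i])):
--             if length == 0:
--                 starting_from = i
--             length += 1
--             # update maximum length
--             if length > maxlength:
--                 maxlength = length
--                 max_starting_from = starting_from
--         else:
--             length = 0
--
--     # generate subarray
--     for i in range(max_starting_from, max_starting_from + maxlength):
--         subarray.append(complex_numbers[i])
--
--     return subarray
--
-- def mountain(number: int) -> bool:
--     """
--     Check if a number is in the form of a mountain
--     :param number:
--     :return:
--     """
--     aux = abs(number)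
--     max_dig = 0
--
--     # find maximum digit
--     while aux != 0:
--         if aux % 10 > max_dig:
--             max_dig = aux % 10
--         aux //= 10
--
--     aux = abs(number)
--     digit = aux % 10
--
--     # check the decreasing part of the mountain
--     while digit != max_dig:
--         aux //= 10
--         if digit >= aux % 10:
--             return False
--         digit = aux % 10
--
--     # check the increasing part of the mountain
--     while aux > 9:
--         aux //= 10
--         if digit <= aux % 10:
--             return False
--         digit = aux % 10
--
--     return True
-- ===== SOURCE B (Python) =====
-- def _mountain(number):
--     a = abs(number)
--     # climb while digits strictly increase toward the most significant end
--     while a > 9 and a % 10 < a // 10 % 10: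
--         a //= 10
--     # then descend while digits strictly decrease toward the most significant end
--     while a > 9 and a % 10 > a // 10 % 10:
--         a //= 10
--     return a <= 9
--
--
-- def real_mountain_subarray(complex_numbers):
--     n = len(complex_numbers)
--     runs = []          # maximal runs of mountain reals, as (start, length)
--     i = 0
--     while i < n:
--         if _mountain(complex_numbers[i][0]):
--             j = i
--             while j < n and _mountain(complex_numbers[j][0]):
--                 j += 1
--             runs.append((i, j - i))
--             i = j
--         else:
--             i += 1
--     if not runs:
--         return []
--     start, length = max(runs, key=lambda r: r[1])
--     return complex_numbers[start:start + length]
-- ===== Notes on version B (the rewrite author's own statement) =====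
-- stated objective: alternative
-- what changed: The mountain predicate drops A's separate max-digit pass and its two maxdig-anchored check loops in favour of a single two-phase monotonic digit walk (climb while strictly increasing, then descend while strictly decreasing, accept iff one digit is left), and the outer scan's running four-variable best-run bookkeeping is replaced by collecting the maximal runs as (start, length) pairs and slicing out the first longest one.
-- outside the precondition, e.g. on real_mountain_subarray([[]]): A raises IndexError, B raises IndexError
import Mathlib
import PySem

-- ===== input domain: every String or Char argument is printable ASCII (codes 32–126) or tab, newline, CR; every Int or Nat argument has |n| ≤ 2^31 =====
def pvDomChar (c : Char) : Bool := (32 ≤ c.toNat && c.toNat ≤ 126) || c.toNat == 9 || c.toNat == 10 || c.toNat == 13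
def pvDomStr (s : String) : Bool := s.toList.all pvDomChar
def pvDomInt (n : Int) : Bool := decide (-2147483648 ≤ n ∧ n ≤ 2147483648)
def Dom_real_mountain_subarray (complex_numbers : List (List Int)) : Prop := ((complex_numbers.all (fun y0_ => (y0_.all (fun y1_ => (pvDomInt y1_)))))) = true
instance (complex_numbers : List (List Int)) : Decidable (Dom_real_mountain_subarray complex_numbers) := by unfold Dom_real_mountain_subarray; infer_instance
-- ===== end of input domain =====

-- B replaces A's mountain test (max-digit pass + two check loops) by a single two-phase
-- monotonic walk, and replaces A's running best-run bookkeeping by collecting maximal runs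
-- and taking the first longest one (objective: simpler/alternative; same asymptotic cost).

-- ===== PORT A =====
-- number[0]; IndexError on an empty row is excluded by Pre_ (getD default never read inside Pre_)
def get_real_part (number : List Int) : Int := (PySem.List.pyGet? number 0).getD 0

-- All of A's loop variables stay non-negative Python ints (aux = abs(number), digits, counters),
-- so they are carried as Nat; Nat / and % coincide with Python // and % on non-negative values.

-- while aux != 0: find maximum digit
def maxDigLoop (aux max_dig : Nat) : Nat :=
  if h : aux ≠ 0 then
    maxDigLoop (aux / 10) (if aux % 10 > max_dig then aux % 10 else max_dig)
  else max_dig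
termination_by aux
decreasing_by exact Nat.div_lt_self (Nat.pos_of_ne_zero h) (by decide)

-- while digit != max_dig: decreasing part of the mountain (returns none = False, some = fall through)
def decLoop (aux digit max_dig : Nat) : Option (Nat × Nat) :=
  if digit ≠ max_dig then
    if h : digit ≥ aux / 10 % 10 then none
    else decLoop (aux / 10) (aux / 10 % 10) max_dig
  else some (aux, digit)
termination_by aux
decreasing_by
  exact Nat.div_lt_self
    (Nat.pos_of_ne_zero (fun h0 => h (h0 ▸ (by decide : (0:Nat) / 10 % 10 = 0) ▸ Nat.zero_le digit)))
    (by decide)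

-- while aux > 9: increasing part of the mountain
def incLoop (aux digit : Nat) : Bool :=
  if h : aux > 9 then
    if digit ≤ aux / 10 % 10 then false
    else incLoop (aux / 10) (aux / 10 % 10)
  else true
termination_by aux
decreasing_by exact Nat.div_lt_self (Nat.lt_of_le_of_lt (Nat.zero_le 9) h) (by decide)

def mountain (number : Int) : Bool :=
  let aux := number.natAbs
  let max_dig := maxDigLoop aux 0
  let digit := aux % 10
  match decLoop aux digit max_dig with
  | none => false
  | some (aux, digit) => incLoop aux digit

-- the body of A's first for-loop, state (maxlength, starting_from, max_starting_from, length)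
def stepA (complex_numbers : List (List Int)) (st : Nat × Nat × Nat × Nat) (i : Nat) :
    Nat × Nat × Nat × Nat :=
  match st with
  | (maxlength, starting_from, max_starting_from, length) =>
    if mountain (get_real_part (complex_numbers.getD i [])) then
      let starting_from := if length = 0 then i else starting_from
      let length := length + 1
      if length > maxlength then (length, starting_from, starting_from, length)
      else (maxlength, starting_from, max_starting_from, length)
    else (maxlength, starting_from, max_starting_from, 0)

def real_mountain_subarray (complex_numbers : List (List Int)) : List (List Int) :=
  let n := complex_numbers.length
  let st := (List.range n).foldl (stepA complex_numbers) (0, 0, 0, 0)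
  -- for i in range(max_starting_from, max_starting_from + maxlength): subarray.append(...)
  (List.range' st.2.2.1 st.1).foldl
    (fun subarray i => subarray ++ [complex_numbers.getD i []]) []

-- ===== PORT B =====
-- row[0]; IndexError on an empty row is excluded by Pre_
def bReal (row : List Int) : Int := (PySem.List.pyGet? row 0).getD 0

-- while a > 9 and a % 10 < a // 10 % 10: a //= 10   (climb the strictly increasing digits)
def climbUp (a : Nat) : Nat :=
  if h : 9 < a ∧ a % 10 < a / 10 % 10 then climbUp (a / 10) else a
termination_by a
decreasing_by exact Nat.div_lt_self (Nat.lt_of_le_of_lt (Nat.zero_le 9) h.1) (by decide)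

-- while a > 9 and a % 10 > a // 10 % 10: a //= 10   (descend the strictly decreasing digits)
def climbDown (a : Nat) : Nat :=
  if h : 9 < a ∧ a / 10 % 10 < a % 10 then climbDown (a / 10) else a
termination_by a
decreasing_by exact Nat.div_lt_self (Nat.lt_of_le_of_lt (Nat.zero_le 9) h.1) (by decide)

def mountainAlt (number : Int) : Bool :=
  decide (climbDown (climbUp number.natAbs) ≤ 9)

-- inner while: j advances over the run of mountain reals
def runEnd (complex_numbers : List (List Int)) (j : Nat) : Nat :=
  if h : j < complex_numbers.length ∧ mountainAlt (bReal (complex_numbers.getD j [])) then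
    runEnd complex_numbers (j + 1)
  else j
termination_by complex_numbers.length - j
decreasing_by exact Nat.sub_succ_lt_self _ _ h.1

-- termination helper for collectRuns (cited by its decreasing_by)
theorem runEnd_ge_aux (complex_numbers : List (List Int)) :
    ∀ (d j : Nat), complex_numbers.length - j ≤ d → j ≤ runEnd complex_numbers j := by
  intro d
  induction d with
  | zero =>
    intro j h
    rw [runEnd]
    split
    · rename_i hc
      exact absurd hc.1 (Nat.not_lt.mpr (Nat.le_of_sub_eq_zero (Nat.le_zero.mp h)))
    · exact Nat.le_refl j
  | succ d ih =>
    intro j h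
    rw [runEnd]
    split
    · rename_i hc
      refine Nat.le_trans (Nat.le_succ j) (ih (j + 1) ?_)
      rw [Nat.sub_succ]
      exact Nat.pred_le_pred h
    · exact Nat.le_refl j

theorem runEnd_ge (complex_numbers : List (List Int)) (j : Nat) : j ≤ runEnd complex_numbers j :=
  runEnd_ge_aux complex_numbers (complex_numbers.length - j) j (Nat.le_refl _)

-- outer while: collect the maximal runs as (start, length)
def collectRuns (complex_numbers : List (List Int)) (i : Nat) : List (Nat × Nat) :=
  if h : i < complex_numbers.length then
    if hm : mountainAlt (bReal (complex_numbers.getD i [])) then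
      let j := runEnd complex_numbers i
      (i, j - i) :: collectRuns complex_numbers j
    else collectRuns complex_numbers (i + 1)
  else []
termination_by complex_numbers.length - i
decreasing_by
  · have h1 : i < runEnd complex_numbers i := by
      rw [runEnd, dif_pos ⟨h, hm⟩]
      exact Nat.lt_of_lt_of_le (Nat.lt_succ_self i) (runEnd_ge complex_numbers (i + 1))
    exact Nat.sub_lt_sub_left h h1
  · exact Nat.sub_succ_lt_self _ _ h

def real_mountain_subarray_alt (complex_numbers : List (List Int)) : List (List Int) :=
  let runs := collectRuns complex_numbers 0
  match PySem.List.max? runs (fun r => r.2) with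
  | none => []    -- if not runs: return []
  | some (start, length) =>
      PySem.List.slice complex_numbers (some (start : Int)) (some ((start : Int) + (length : Int)))

-- ===== PRECONDITION & SPEC =====
-- Pre_ excludes only inputs containing an empty inner list, on which Python A raises IndexError
-- (number[0] in get_real_part).
def Pre_real_mountain_subarray (complex_numbers : List (List Int)) : Prop :=
  ∀ row ∈ complex_numbers, row ≠ []
instance (complex_numbers : List (List Int)) : Decidable (Pre_real_mountain_subarray complex_numbers) := by
  unfold Pre_real_mountain_subarray; infer_instance

def pvWitness_real_mountain_subarray : List (List Int) := [[121], [7, 3], [-10], [1221]]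

def Spec_real_mountain_subarray (complex_numbers : List (List Int)) (out : List (List Int)) : Prop := out = real_mountain_subarray_alt complex_numbers
instance (complex_numbers : List (List Int)) (out : List (List Int)) : Decidable (Spec_real_mountain_subarray complex_numbers out) := by unfold Spec_real_mountain_subarray; infer_instance

-- ===== CLAIM (what is proved, stated in full; the proofs are below) =====
def Claim_equal_real_mountain_subarray : Prop := ∀ (complex_numbers : List (List Int)), Dom_real_mountain_subarray complex_numbers → Pre_real_mountain_subarray complex_numbers → Spec_real_mountain_subarray complex_numbers (real_mountain_subarray complex_numbers)

-- ===== LEMMAS AND PROOFS =====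

-- ---- the two mountain predicates agree ----

theorem maxDigLoop_zero (m : Nat) : maxDigLoop 0 m = m := by
  rw [maxDigLoop]; simp

theorem maxDigLoop_max : ∀ (a m : Nat), maxDigLoop a m = max m (maxDigLoop a 0) := by
  intro a
  induction a using Nat.strong_induction_on with
  | _ a ih =>
    intro m
    by_cases h : a = 0
    · subst h; rw [maxDigLoop_zero, maxDigLoop_zero]; omega
    · conv_lhs => rw [maxDigLoop]
      conv_rhs => rw [maxDigLoop]
      rw [dif_pos h, dif_pos h]
      rw [ih (a / 10) (by omega) (if a % 10 > m then a % 10 else m),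
        ih (a / 10) (by omega) (if a % 10 > 0 then a % 10 else 0)]
      split_ifs <;> omega

theorem maxDig_step (a : Nat) (h : a ≠ 0) :
    maxDigLoop a 0 = max (a % 10) (maxDigLoop (a / 10) 0) := by
  conv_lhs => rw [maxDigLoop]
  rw [dif_pos h, maxDigLoop_max]
  split_ifs <;> omega

theorem mod_le_maxDig (a : Nat) : a % 10 ≤ maxDigLoop a 0 := by
  by_cases h : a = 0
  · subst h; simp
  · rw [maxDig_step a h]; omega

theorem climbUp_maxDig : ∀ (a : Nat), maxDigLoop (climbUp a) 0 = maxDigLoop a 0 := by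
  intro a
  induction a using Nat.strong_induction_on with
  | _ a ih =>
    rw [climbUp]
    split
    · rename_i h
      rw [ih (a / 10) (by omega)]
      rw [maxDig_step a (by omega)]
      have h2 := mod_le_maxDig (a / 10)
      omega
    · rfl

theorem climbDown_le9 : ∀ (a : Nat), climbDown a ≤ 9 → maxDigLoop a 0 ≤ a % 10 := by
  intro a
  induction a using Nat.strong_induction_on with
  | _ a ih =>
    intro hle
    rw [climbDown] at hle
    split at hle
    · rename_i h
      have h2 := ih (a / 10) (by omega) hle
      rw [maxDig_step a (by omega)]
      omega
    · rename_i h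
      -- climbDown a = a ≤ 9
      by_cases h0 : a = 0
      · subst h0; simp [maxDigLoop_zero]
      · rw [maxDig_step a h0]
        have : a / 10 = 0 := by omega
        rw [this]
        rw [maxDigLoop_zero]
        omega

theorem incLoop_eq : ∀ (a : Nat), incLoop a (a % 10) = decide (climbDown a ≤ 9) := by
  intro a
  induction a using Nat.strong_induction_on with
  | _ a ih =>
    rw [incLoop, climbDown]
    by_cases h9 : 9 < a
    · rw [dif_pos h9]
      by_cases hd : a % 10 ≤ a / 10 % 10
      · rw [if_pos hd, dif_neg (by omega)]
        simp; omega
      · rw [if_neg hd, dif_pos (by omega)]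
        exact ih (a / 10) (by omega)
    · rw [dif_neg h9, dif_neg (by omega)]
      simp; omega

theorem decLoop_eq : ∀ (a : Nat),
    decLoop a (a % 10) (maxDigLoop a 0) =
      (if climbUp a % 10 = maxDigLoop a 0 then some (climbUp a, climbUp a % 10) else none) := by
  intro a
  induction a using Nat.strong_induction_on with
  | _ a ih =>
    rw [decLoop]
    by_cases heq : a % 10 = maxDigLoop a 0
    · rw [if_neg (by simpa using heq)]
      have hstop : climbUp a = a := by
        rw [climbUp]
        rw [dif_neg]
        intro hc
        have h1 := mod_le_maxDig (a / 10)
        have h2 := maxDig_step a (by omega)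
        omega
      rw [hstop, if_pos heq]
    · rw [if_pos (by simpa using heq)]
      by_cases hinc : a % 10 < a / 10 % 10
      · have h9 : 9 < a := by omega
        rw [dif_neg (by omega)]
        have hDa : maxDigLoop a 0 = maxDigLoop (a / 10) 0 := by
          rw [maxDig_step a (by omega)]
          have := mod_le_maxDig (a / 10)
          omega
        have hup : climbUp a = climbUp (a / 10) := by
          rw [climbUp]; rw [dif_pos ⟨h9, hinc⟩]
        rw [hDa, hup]
        exact ih (a / 10) (by omega)
      · rw [dif_pos (by omega)]
        have hstop : climbUp a = a := by
          rw [climbUp]; rw [dif_neg (by omega)]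
        rw [hstop, if_neg heq]

theorem mountain_eq_alt (x : Int) : mountain x = mountainAlt x := by
  show (match decLoop x.natAbs (x.natAbs % 10) (maxDigLoop x.natAbs 0) with
        | none => false
        | some (aux, digit) => incLoop aux digit) = decide (climbDown (climbUp x.natAbs) ≤ 9)
  rw [decLoop_eq x.natAbs]
  by_cases h : climbUp x.natAbs % 10 = maxDigLoop x.natAbs 0
  · rw [if_pos h]
    show incLoop (climbUp x.natAbs) (climbUp x.natAbs % 10) = _
    rw [incLoop_eq]
  · rw [if_neg h]
    show false = _
    symm
    simp only [decide_eq_false_iff_not]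
    intro hle
    have h1 := climbDown_le9 (climbUp x.natAbs) hle
    have h2 := climbUp_maxDig x.natAbs
    have h3 := mod_le_maxDig (climbUp x.natAbs)
    omega

-- ---- outer loops ----

theorem cond_eq (r : List Int) : mountain (get_real_part r) = mountainAlt (bReal r) := by
  rw [mountain_eq_alt]; rfl

theorem stepA_true (cs : List (List Int)) (i ml sf mss len : Nat)
    (h : mountainAlt (bReal (cs.getD i [])) = true) :
    stepA cs (ml, sf, mss, len) i =
      (if len + 1 > ml then (len + 1, (if len = 0 then i else sf), (if len = 0 then i else sf), len + 1)
       else (ml, (if len = 0 then i else sf), mss, len + 1)) := by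
  simp only [stepA]
  rw [cond_eq, h]
  simp

theorem stepA_false (cs : List (List Int)) (i ml sf mss len : Nat)
    (h : mountainAlt (bReal (cs.getD i [])) = false) :
    stepA cs (ml, sf, mss, len) i = (ml, sf, mss, 0) := by
  simp only [stepA]
  rw [cond_eq, h]
  simp

theorem runEnd_gt (cs : List (List Int)) (j : Nat) (h : j < cs.length)
    (hm : mountainAlt (bReal (cs.getD j [])) = true) : j + 1 ≤ runEnd cs j := by
  rw [runEnd, dif_pos ⟨h, hm⟩]
  exact runEnd_ge cs (j + 1)

theorem runEnd_le_aux (cs : List (List Int)) :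
    ∀ (d j : Nat), cs.length - j ≤ d → j ≤ cs.length → runEnd cs j ≤ cs.length := by
  intro d
  induction d with
  | zero =>
    intro j h hj
    rw [runEnd]
    split
    · rename_i hc; omega
    · exact hj
  | succ d ih =>
    intro j h hj
    rw [runEnd]
    split
    · rename_i hc; exact ih (j + 1) (by omega) (by omega)
    · exact hj

theorem runEnd_le (cs : List (List Int)) (j : Nat) (hj : j ≤ cs.length) :
    runEnd cs j ≤ cs.length :=
  runEnd_le_aux cs (cs.length - j) j (Nat.le_refl _) hj

theorem runEnd_true_aux (cs : List (List Int)) :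
    ∀ (d j : Nat), cs.length - j ≤ d → ∀ k, j ≤ k → k < runEnd cs j →
      mountainAlt (bReal (cs.getD k [])) = true := by
  intro d
  induction d with
  | zero =>
    intro j h
    rw [runEnd]
    split
    · rename_i hc; omega
    · intro k h1 h2; omega
  | succ d ih =>
    intro j h
    rw [runEnd]
    split
    · rename_i hc
      intro k h1 h2
      by_cases hkj : k = j
      · subst hkj; exact hc.2
      · exact ih (j + 1) (by omega) k (by omega) h2
    · intro k h1 h2; omega

theorem runEnd_true (cs : List (List Int)) (j k : Nat) (h1 : j ≤ k) (h2 : k < runEnd cs j) :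
    mountainAlt (bReal (cs.getD k [])) = true :=
  runEnd_true_aux cs (cs.length - j) j (Nat.le_refl _) k h1 h2

theorem runEnd_stop_aux (cs : List (List Int)) :
    ∀ (d j : Nat), cs.length - j ≤ d → runEnd cs j < cs.length →
      mountainAlt (bReal (cs.getD (runEnd cs j) [])) = false := by
  intro d
  induction d with
  | zero =>
    intro j h
    rw [runEnd]
    split
    · rename_i hc; omega
    · rename_i hc
      intro hlt
      cases hP : mountainAlt (bReal (cs.getD j []))
      · rfl
      · exact absurd ⟨hlt, hP⟩ hc
  | succ d ih =>
    intro j h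
    rw [runEnd]
    split
    · rename_i hc; exact ih (j + 1) (by omega)
    · rename_i hc
      intro hlt
      cases hP : mountainAlt (bReal (cs.getD j []))
      · rfl
      · exact absurd ⟨hlt, hP⟩ hc

theorem runEnd_stop (cs : List (List Int)) (j : Nat) (h : runEnd cs j < cs.length) :
    mountainAlt (bReal (cs.getD (runEnd cs j) [])) = false :=
  runEnd_stop_aux cs (cs.length - j) j (Nat.le_refl _) h

theorem collectRuns_pos_le_aux (cs : List (List Int)) :
    ∀ (d i : Nat), cs.length - i ≤ d → ∀ r ∈ collectRuns cs i, 0 < r.2 ∧ r.1 + r.2 ≤ cs.length := by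
  intro d
  induction d with
  | zero =>
    intro i h
    rw [collectRuns]
    split
    · rename_i hc; omega
    · simp
  | succ d ih =>
    intro i h
    rw [collectRuns]
    split
    · rename_i hi
      split
      · rename_i hm
        have hgt := runEnd_gt cs i hi hm
        have hle := runEnd_le cs i (by omega)
        intro r hr
        rcases List.mem_cons.mp hr with hr | hr
        · subst hr; constructor <;> simp <;> omega
        · exact ih (runEnd cs i) (by omega) r hr
      · rename_i hm
        intro r hr
        exact ih (i + 1) (by omega) r hr
    · simp

theorem collectRuns_pos_le (cs : List (List Int)) (i : Nat) :
    ∀ r ∈ collectRuns cs i, 0 < r.2 ∧ r.1 + r.2 ≤ cs.length :=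
  collectRuns_pos_le_aux cs (cs.length - i) i (Nat.le_refl _)

-- proof-side: the effect of one completed run on A's (maxlength, max_starting_from)
def stepB (b r : Nat × Nat) : Nat × Nat := if r.2 > b.1 then (r.2, r.1) else b

theorem absorbRun (cs : List (List Int)) (sf : Nat) :
    ∀ (d k ml mss len : Nat),
      (∀ t, t < d → mountainAlt (bReal (cs.getD (k + t) [])) = true) → 0 < len → len ≤ ml →
      (List.range' k d).foldl (stepA cs) (ml, sf, mss, len)
        = (max (len + d) ml, sf, if ml < len + d then sf else mss, len + d) := by
  intro d
  induction d with
  | zero =>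
    intro k ml mss len hP hl hml
    simp only [List.range'_zero, List.foldl_nil]
    rw [if_neg (by omega)]
    simp only [Prod.mk.injEq, true_and]
    omega
  | succ d ih =>
    intro k ml mss len hP hl hml
    rw [List.range'_succ, List.foldl_cons]
    rw [stepA_true cs k ml sf mss len (hP 0 (by omega))]
    rw [if_neg (by omega : ¬ len = 0)]
    have hP' : ∀ t, t < d → mountainAlt (bReal (cs.getD (k + 1 + t) [])) = true := by
      intro t ht
      have := hP (t + 1) (by omega)
      rw [show k + (t + 1) = k + 1 + t from by omega] at this
      exact this
    by_cases hgt : len + 1 > ml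
    · rw [if_pos hgt]
      rw [ih (k + 1) (len + 1) sf (len + 1) hP' (by omega) (by omega)]
      simp only [Prod.mk.injEq, true_and]
      split_ifs <;> omega
    · rw [if_neg hgt]
      rw [ih (k + 1) ml mss (len + 1) hP' (by omega) (by omega)]
      simp only [Prod.mk.injEq, true_and]
      split_ifs <;> omega

theorem scanEq (cs : List (List Int)) :
    ∀ (d i ml sf mss : Nat), cs.length - i ≤ d →
      ((((List.range' i (cs.length - i)).foldl (stepA cs) (ml, sf, mss, 0)).1,
        (((List.range' i (cs.length - i)).foldl (stepA cs) (ml, sf, mss, 0)).2.2.1))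
        = (collectRuns cs i).foldl stepB (ml, mss)) := by
  intro d
  induction d with
  | zero =>
    intro i ml sf mss h
    rw [show cs.length - i = 0 from by omega]
    rw [collectRuns, dif_neg (by omega)]
    simp
  | succ d ih =>
    intro i ml sf mss h
    by_cases hi : i < cs.length
    · by_cases hm : mountainAlt (bReal (cs.getD i [])) = true
      · have hj1 : i + 1 ≤ runEnd cs i := runEnd_gt cs i hi hm
        have hj2 : runEnd cs i ≤ cs.length := runEnd_le cs i (by omega)
        have htr : ∀ t, t < runEnd cs i - i - 1 →
            mountainAlt (bReal (cs.getD (i + 1 + t) [])) = true := by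
          intro t ht
          exact runEnd_true cs i (i + 1 + t) (by omega) (by omega)
        have hsplit : List.range' i (runEnd cs i - i) ++ List.range' (runEnd cs i) (cs.length - runEnd cs i)
            = List.range' i (cs.length - i) := by
          have hap := List.range'_append (s := i) (m := runEnd cs i - i) (n := cs.length - runEnd cs i) (step := 1)
          rw [show i + 1 * (runEnd cs i - i) = runEnd cs i from by omega] at hap
          rw [hap, show (runEnd cs i - i) + (cs.length - runEnd cs i) = cs.length - i from by omega]
        rw [← hsplit, List.foldl_append]
        rw [show runEnd cs i - i = (runEnd cs i - i - 1) + 1 from by omega]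
        rw [List.range'_succ, List.foldl_cons]
        rw [stepA_true cs i ml sf mss 0 hm]
        rw [if_pos (rfl : (0 : Nat) = 0)]
        have hstate : (if 0 + 1 > ml then ((0:Nat) + 1, i, i, (0:Nat) + 1) else (ml, i, mss, (0:Nat) + 1))
            = ((max 1 ml : Nat), i, (if ml < 1 then i else mss), (1 : Nat)) := by
          split_ifs <;> simp only [Prod.mk.injEq, and_true] <;> omega
        rw [hstate]
        rw [absorbRun cs i (runEnd cs i - i - 1) (i + 1) (max 1 ml) (if ml < 1 then i else mss) 1
          htr (by omega) (by omega)]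
        -- collectRuns on this run
        conv_rhs => rw [collectRuns, dif_pos hi, dif_pos hm]
        rw [List.foldl_cons]
        have hstepB : stepB (ml, mss) (i, runEnd cs i - i)
            = (max (runEnd cs i - i) ml, if ml < runEnd cs i - i then i else mss) := by
          simp only [stepB]
          split_ifs <;> simp only [Prod.mk.injEq, and_true] <;> omega
        rw [hstepB]
        by_cases hjl : runEnd cs i < cs.length
        · have hPj := runEnd_stop cs i hjl
          rw [show cs.length - runEnd cs i = (cs.length - (runEnd cs i + 1)) + 1 from by omega]
          rw [List.range'_succ, List.foldl_cons]
          rw [stepA_false cs (runEnd cs i) _ _ _ _ hPj]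
          have hrw : (max (1 + (runEnd cs i - i - 1)) (max 1 ml), i,
              (if max 1 ml < 1 + (runEnd cs i - i - 1) then i else if ml < 1 then i else mss),
              (0:Nat))
              = ((max (runEnd cs i - i) ml : Nat), i, (if ml < runEnd cs i - i then i else mss), (0:Nat)) := by
            simp only [Prod.mk.injEq, and_true, true_and]
            split_ifs <;> omega
          rw [hrw]
          have hcr : collectRuns cs (runEnd cs i) = collectRuns cs (runEnd cs i + 1) := by
            rw [collectRuns, dif_pos hjl, dif_neg (by rw [hPj]; simp)]
          rw [hcr]
          exact ih (runEnd cs i + 1) (max (runEnd cs i - i) ml) i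
            (if ml < runEnd cs i - i then i else mss) (by omega)
        · rw [show cs.length - runEnd cs i = 0 from by omega]
          simp only [List.range'_zero, List.foldl_nil]
          rw [show collectRuns cs (runEnd cs i) = [] from by
            rw [collectRuns, dif_neg (by omega)]]
          simp only [List.foldl_nil]
          simp only [Prod.mk.injEq]
          split_ifs <;> omega
      · rw [show cs.length - i = (cs.length - (i + 1)) + 1 from by omega]
        rw [List.range'_succ, List.foldl_cons]
        rw [stepA_false cs i ml sf mss 0 (by simpa using hm)]
        rw [show collectRuns cs i = collectRuns cs (i + 1) from by
          rw [collectRuns, dif_pos hi, dif_neg hm]]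
        exact ih (i + 1) ml sf mss (by omega)
    · rw [show cs.length - i = 0 from by omega]
      rw [collectRuns, dif_neg hi]
      simp

theorem maxFold_aux :
    ∀ (l : List (Nat × Nat)) (q : Nat × Nat),
      List.foldl (fun acc x => match acc with
        | none => some x
        | some m => if m.2 < x.2 then some x else some m) (some q) l
        = some ((l.foldl stepB (q.2, q.1)).2, (l.foldl stepB (q.2, q.1)).1) := by
  intro l
  induction l with
  | nil => intro q; simp
  | cons x l ih =>
    intro q
    simp only [List.foldl_cons]
    by_cases hc : q.2 < x.2
    · rw [if_pos hc]
      rw [show stepB (q.2, q.1) x = (x.2, x.1) from by simp only [stepB]; rw [if_pos hc]]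
      exact ih x
    · rw [if_neg hc]
      rw [show stepB (q.2, q.1) x = (q.2, q.1) from by simp only [stepB]; rw [if_neg hc]]
      exact ih q

theorem max?_eq_stepB (l : List (Nat × Nat)) (r : Nat × Nat) (hr : 0 < r.2) :
    PySem.List.max? (r :: l) (fun p => p.2)
      = some ((((r :: l).foldl stepB (0, 0)).2, ((r :: l).foldl stepB (0, 0)).1)) := by
  have h0 : (r :: l).foldl stepB (0, 0) = l.foldl stepB (r.2, r.1) := by
    simp only [List.foldl_cons, stepB]
    rw [if_pos (by simpa using hr)]
  rw [h0]
  have key : PySem.List.max? (r :: l) (fun p => p.2)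
      = List.foldl (fun acc x => match acc with
          | none => some x
          | some m => if m.2 < x.2 then some x else some m) (some r) l := by
    show List.foldl _ (some r) l = _
    congr 1
    funext acc x
    cases acc with
    | none => rfl
    | some m => rfl
  rw [key]
  exact maxFold_aux l r

theorem stepB_bound (n : Nat) :
    ∀ (l : List (Nat × Nat)) (b : Nat × Nat),
      (∀ r ∈ l, r.1 + r.2 ≤ n) → b.2 + b.1 ≤ n →
      (l.foldl stepB b).2 + (l.foldl stepB b).1 ≤ n := by
  intro l
  induction l with
  | nil => intro b _ hb; simpa using hb
  | cons x l ih =>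
    intro b hl hb
    simp only [List.foldl_cons]
    apply ih
    · intro r hr; exact hl r (List.mem_cons_of_mem _ hr)
    · have hx := hl x List.mem_cons_self
      simp only [stepB]
      split_ifs <;> simp <;> omega

theorem map_getD_range' (cs : List (List Int)) :
    ∀ (L s : Nat), s + L ≤ cs.length →
      (List.range' s L).map (fun i => cs.getD i []) = (cs.drop s).take L := by
  intro L
  induction L with
  | zero => intro s _; simp
  | succ L ih =>
    intro s h
    have hs : s < cs.length := by omega
    rw [List.range'_succ, List.map_cons]
    rw [ih (s + 1) (by omega)]
    rw [List.drop_eq_getElem_cons hs, List.take_succ_cons]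
    congr 1
    simp [List.getD_eq_getElem?_getD, List.getElem?_eq_getElem hs]

theorem main_eq (cs : List (List Int)) : real_mountain_subarray cs = real_mountain_subarray_alt cs := by
  show (List.range' ((List.range cs.length).foldl (stepA cs) (0, 0, 0, 0)).2.2.1
          ((List.range cs.length).foldl (stepA cs) (0, 0, 0, 0)).1).foldl
        (fun subarray i => subarray ++ [cs.getD i []]) []
      = match PySem.List.max? (collectRuns cs 0) (fun r => r.2) with
        | none => []
        | some (start, length) =>
            PySem.List.slice cs (some (start : Int)) (some ((start : Int) + (length : Int)))
  rw [List.range_eq_range']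
  have hscan := scanEq cs cs.length 0 0 0 0 (by omega)
  simp only [Nat.sub_zero] at hscan
  cases hruns : collectRuns cs 0 with
  | nil =>
    rw [hruns] at hscan
    simp only [List.foldl_nil, Prod.mk.injEq] at hscan
    rw [show PySem.List.max? ([] : List (Nat × Nat)) (fun p => p.2) = none from rfl]
    rw [hscan.1]
    simp
  | cons r rest =>
    have hmem := collectRuns_pos_le cs 0
    rw [hruns] at hmem hscan
    have hr2 : 0 < r.2 := (hmem r List.mem_cons_self).1
    rw [max?_eq_stepB rest r hr2]
    rw [List.foldl_cons] at hscan ⊢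
    set b := rest.foldl stepB (stepB (0, 0) r) with hb
    have hbound : b.2 + b.1 ≤ cs.length := by
      apply stepB_bound
      · intro q hq; exact (hmem q (List.mem_cons_of_mem _ hq)).2
      · simp only [stepB]
        have := (hmem r List.mem_cons_self).2
        split_ifs <;> simp <;> omega
    have h1 := congrArg Prod.fst hscan
    have h2 := congrArg Prod.snd hscan
    simp at h1 h2
    rw [h1, h2]
    show _ = PySem.List.slice cs (some ((b.2 : Nat) : Int)) (some (((b.2 : Nat) : Int) + ((b.1 : Nat) : Int)))
    rw [PySem.List.slice_natCast_add]
    rw [PySem.List.foldl_append_singleton_eq_map (fun i => cs.getD i []) _ []]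
    rw [map_getD_range' cs b.1 b.2 (by omega)]
    simp

-- ===== VERDICT (by name: the statement is the Claim_ definition above) =====
theorem real_mountain_subarray_spec : Claim_equal_real_mountain_subarray := by
  intro cs _ _
  unfold Spec_real_mountain_subarray
  exact main_eq cs
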